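-- pv_equiv track=rewrite | github.com/ADITYA-kus/codemap_ai | analysis/explain/summary_generator.py | _tags_from_callees
-- ===== SOURCE A (Python) =====
-- from typing import Any, Dict, Optional, List
--
-- def _tags_from_callees(callee_fqns: List[str]) -> List[str]:
--     tags: List[str] = []
--     if any(c == "builtins.print" for c in callee_fqns):
--         tags.append("io:print")
--     if any(c == "builtins.open" for c in callee_fqns):
--         tags.append("io:file")
--     if any("read" in c.lower() or "load" in c.lower() for c in callee_fqns):
--         tags.append("io:read")
--     if any("write" in c.lower() or "save" in c.lower() for c in callee_fqns):
--         tags.append("io:write")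
--     return tags
-- ===== SOURCE B (Python) =====
-- from typing import List
--
-- _TAG_ORDER = ["io:print", "io:file", "io:read", "io:write"]
--
-- def _callee_tags(c: str) -> List[str]:
--     """Tags that this single callee name triggers."""
--     lc = c.lower()
--     tags: List[str] = []
--     if c == "builtins.print":
--         tags.append("io:print")
--     if c == "builtins.open":
--         tags.append("io:file")
--     if "read" in lc or "load" in lc:
--         tags.append("io:read")
--     if "write" in lc or "save" in lc:
--         tags.append("io:write")
--     return tags
--
-- def _tags_from_callees(callee_fqns: List[str]) -> List[str]:
--     triggered = set()
--     for c in callee_fqns: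
--         triggered.update(_callee_tags(c))
--     return [t for t in _TAG_ORDER if t in triggered]
-- ===== Notes on version B (the rewrite author's own statement) =====
-- stated objective: alternative
-- what changed: Inverts the decomposition: instead of four whole-list any()-scans, each callee name is mapped to the list of tags it individually triggers, these are accumulated into a set, and the result is the canonical tag order filtered by set membership.
import Mathlib
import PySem

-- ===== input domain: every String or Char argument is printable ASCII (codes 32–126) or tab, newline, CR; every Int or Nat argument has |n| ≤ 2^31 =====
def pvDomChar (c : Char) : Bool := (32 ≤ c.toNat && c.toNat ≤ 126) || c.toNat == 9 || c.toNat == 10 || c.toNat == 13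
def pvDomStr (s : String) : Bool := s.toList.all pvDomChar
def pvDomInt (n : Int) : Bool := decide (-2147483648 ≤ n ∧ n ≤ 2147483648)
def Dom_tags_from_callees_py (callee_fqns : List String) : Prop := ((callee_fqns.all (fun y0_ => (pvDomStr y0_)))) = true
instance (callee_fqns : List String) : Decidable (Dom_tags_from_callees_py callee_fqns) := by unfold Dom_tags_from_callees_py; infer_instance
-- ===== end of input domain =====

-- B inverts the decomposition: each callee is mapped to its individual tag list, these are unioned into a set, and the canonical tag order is filtered by membership (alternative, same cost class).

-- ===== PORT A =====
def tags_from_callees_py (callee_fqns : List String) : List String :=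
  let tags : List String := []
  let tags := if callee_fqns.any (fun c => c == "builtins.print") then tags ++ ["io:print"] else tags
  let tags := if callee_fqns.any (fun c => c == "builtins.open") then tags ++ ["io:file"] else tags
  let tags := if callee_fqns.any (fun c => PySem.Str.isIn "read" (PySem.Str.lower c) || PySem.Str.isIn "load" (PySem.Str.lower c)) then tags ++ ["io:read"] else tags
  let tags := if callee_fqns.any (fun c => PySem.Str.isIn "write" (PySem.Str.lower c) || PySem.Str.isIn "save" (PySem.Str.lower c)) then tags ++ ["io:write"] else tags
  tags

-- ===== PORT B =====
def calleeTags (c : String) : List String :=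
  let lc := PySem.Str.lower c
  let tags : List String := []
  let tags := if c == "builtins.print" then tags ++ ["io:print"] else tags
  let tags := if c == "builtins.open" then tags ++ ["io:file"] else tags
  let tags := if PySem.Str.isIn "read" lc || PySem.Str.isIn "load" lc then tags ++ ["io:read"] else tags
  let tags := if PySem.Str.isIn "write" lc || PySem.Str.isIn "save" lc then tags ++ ["io:write"] else tags
  tags

def tagOrder : List String := ["io:print", "io:file", "io:read", "io:write"]

def tags_from_callees_py_alt (callee_fqns : List String) : List String :=
  let triggered : PySem.Set String :=
    callee_fqns.foldl (fun s c => PySem.Set.update s (calleeTags c)) PySem.Set.empty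
  tagOrder.filter (fun t => PySem.Set.contains triggered t)

-- ===== PRECONDITION & SPEC =====
def Spec_tags_from_callees_py (callee_fqns : List String) (out : List String) : Prop :=
  out = tags_from_callees_py_alt callee_fqns
instance (callee_fqns : List String) (out : List String) : Decidable (Spec_tags_from_callees_py callee_fqns out) := by
  unfold Spec_tags_from_callees_py; infer_instance

-- ===== CLAIM =====
def Claim_equal_tags_from_callees_py : Prop :=
  ∀ (callee_fqns : List String), Dom_tags_from_callees_py callee_fqns →
    Spec_tags_from_callees_py callee_fqns (tags_from_callees_py callee_fqns)

-- ===== LEMMAS AND PROOFS =====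
theorem contains_update (s : PySem.Set String) (ts : List String) (t : String) :
    PySem.Set.contains (PySem.Set.update s ts) t = (PySem.Set.contains s t || ts.any (fun x => x == t)) := by
  induction ts generalizing s with
  | nil => simp [PySem.Set.update]
  | cons x xs ih =>
    simp only [PySem.Set.update, List.foldl_cons, List.any_cons] at *
    rw [ih]
    have hadd : PySem.Set.contains (PySem.Set.add s x) t = (PySem.Set.contains s t || (x == t)) := by
      by_cases h : x = t
      · subst h; simp [PySem.Set.contains, PySem.Set.mem_add]
      · simp [PySem.Set.contains, PySem.Set.mem_add, h, Lean.Grind.beq_eq_decide_eq, Ne.symm h]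
    rw [hadd, Bool.or_assoc]

theorem contains_fold (callee_fqns : List String) (s : PySem.Set String) (t : String) :
    PySem.Set.contains (callee_fqns.foldl (fun s c => PySem.Set.update s (calleeTags c)) s) t
      = (PySem.Set.contains s t || callee_fqns.any (fun c => (calleeTags c).any (fun x => x == t))) := by
  induction callee_fqns generalizing s with
  | nil => simp
  | cons c cs ih =>
    simp only [List.foldl_cons, List.any_cons, ih, contains_update, Bool.or_assoc]

theorem calleeTags_print (c : String) :
    (calleeTags c).any (fun x => x == "io:print") = (c == "builtins.print") := by
  unfold calleeTags
  split_ifs <;>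
    simp_all [Lean.Grind.beq_eq_decide_eq] <;>
    split_ifs <;> simp_all

theorem calleeTags_file (c : String) :
    (calleeTags c).any (fun x => x == "io:file") = (c == "builtins.open") := by
  unfold calleeTags
  split_ifs <;>
    simp_all [Lean.Grind.beq_eq_decide_eq] <;>
    split_ifs <;> simp_all

theorem calleeTags_read (c : String) :
    (calleeTags c).any (fun x => x == "io:read")
      = (PySem.Str.isIn "read" (PySem.Str.lower c) || PySem.Str.isIn "load" (PySem.Str.lower c)) := by
  unfold calleeTags
  split_ifs <;>
    simp_all [Lean.Grind.beq_eq_decide_eq] <;>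
    split_ifs <;> simp_all

theorem calleeTags_write (c : String) :
    (calleeTags c).any (fun x => x == "io:write")
      = (PySem.Str.isIn "write" (PySem.Str.lower c) || PySem.Str.isIn "save" (PySem.Str.lower c)) := by
  unfold calleeTags
  split_ifs <;>
    simp_all [Lean.Grind.beq_eq_decide_eq] <;>
    split_ifs <;> simp_all

-- ===== VERDICT =====
theorem tags_from_callees_py_spec : Claim_equal_tags_from_callees_py := by
  intro callee_fqns _
  unfold Spec_tags_from_callees_py tags_from_callees_py tags_from_callees_py_alt tagOrder
  simp only [List.filter_cons, List.filter_nil, contains_fold,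
    calleeTags_print, calleeTags_file, calleeTags_read, calleeTags_write,
    show ∀ t : String, PySem.Set.contains PySem.Set.empty t = false from fun t => rfl,
    Bool.false_or]
  split_ifs <;> simp_all
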